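-- pv_equiv track=rewrite | github.com/WPettersson/kidney_solver | kidney_solver/edmonds.py | get_blossom_path
-- ===== SOURCE A (Python) =====
-- def get_blossom_path(blossom, entry, leave):
--     """Given a blossom (odd length cycle) and an leave and entry point, find the
--     even length route around the cycle.
--
--     :param blossom: the cycle, as a list of vertices
--     :param entry, leave: the entry and leave points around the cycle
--
--     :return: the even length path from entry to leave around the cycle
--     """
--
--     # Build up the backwards path in two stages, one from the "first" vertex in
--     # the list, and one from the "last" vertex in the list
--     back = []
--     backtwo = []
--     fore = []
--     # Stage = 1 means before first of leave/entry, stage 2 means between the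
--     # two, stage 3 means after the final leave/entry
--     stage = 1
--     for vert in blossom:
--         if stage == 1:
--             back.append(vert)
--             if vert == entry or vert == leave:
--                 fore.append(vert)
--                 stage = 2
--                 continue
--         if stage == 2:
--             fore.append(vert)
--             if vert == entry or vert == leave:
--                 backtwo.append(vert)
--                 stage = 3
--                 continue
--         if stage == 3:
--             backtwo.append(vert)
--     if len(fore) % 2 == 0:
--         return fore
--     back.reverse()
--     backtwo.reverse()
--     return back + backtwo
-- ===== SOURCE B (Python) =====
-- def get_blossom_path(blossom, entry, leave):
--     i = next((k for k, v in enumerate(blossom) if v == entry or v == leave), None)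
--     if i is None:
--         return []
--     j = next((k for k in range(i + 1, len(blossom))
--               if blossom[k] == entry or blossom[k] == leave), None)
--     if j is None:
--         fore = blossom[i:]
--         return fore if len(fore) % 2 == 0 else blossom[i::-1]
--     fore = blossom[i:j + 1]
--     return fore if len(fore) % 2 == 0 else blossom[i::-1] + blossom[j:][::-1]
-- ===== Notes on version B (the rewrite author's own statement) =====
-- stated objective: simpler
-- what changed: B replaces A's three-stage accumulator state machine (maintaining back/fore/backtwo lists while folding over the cycle) by first locating the two boundary indices i and j and then building the answer by list slicing.
import Mathlib
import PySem

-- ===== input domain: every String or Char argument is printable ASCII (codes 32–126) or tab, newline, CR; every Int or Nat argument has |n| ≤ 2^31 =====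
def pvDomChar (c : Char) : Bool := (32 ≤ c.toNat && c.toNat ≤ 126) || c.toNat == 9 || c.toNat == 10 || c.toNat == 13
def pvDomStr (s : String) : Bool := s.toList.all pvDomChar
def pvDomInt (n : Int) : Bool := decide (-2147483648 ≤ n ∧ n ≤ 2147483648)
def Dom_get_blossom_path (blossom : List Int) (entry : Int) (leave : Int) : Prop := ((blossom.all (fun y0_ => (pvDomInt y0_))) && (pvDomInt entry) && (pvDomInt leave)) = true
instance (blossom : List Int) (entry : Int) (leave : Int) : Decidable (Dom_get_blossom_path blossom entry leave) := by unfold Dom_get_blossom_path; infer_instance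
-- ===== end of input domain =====

-- B replaces A's three-stage accumulator state machine by first locating the two
-- boundary indices and then slicing the list (objective: simpler).

-- ===== PORT A =====
-- one loop iteration of A: state is (back, fore, backtwo, stage)
def pvStepA (entry leave : Int) (st : List Int × List Int × List Int × Nat) (v : Int) :
    List Int × List Int × List Int × Nat :=
  match st with
  | (back, fore, backtwo, stage) =>
    if stage == 1 then
      if v == entry || v == leave then (back ++ [v], fore ++ [v], backtwo, 2)
      else (back ++ [v], fore, backtwo, 1)
    else if stage == 2 then
      if v == entry || v == leave then (back, fore ++ [v], backtwo ++ [v], 3)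
      else (back, fore ++ [v], backtwo, 2)
    else (back, fore, backtwo ++ [v], 3)

def get_blossom_path (blossom : List Int) (entry : Int) (leave : Int) : List Int :=
  match blossom.foldl (pvStepA entry leave) ([], [], [], 1) with
  | (back, fore, backtwo, _) =>
    if fore.length % 2 == 0 then fore else back.reverse ++ backtwo.reverse

-- ===== PORT B =====
-- first index k' ≥ k (k = offset of the list's head) whose element is entry or leave
def pvFindMatch (entry leave : Int) : List Int → Nat → Option Nat
  | [], _ => none
  | v :: rest, k => if v == entry || v == leave then some k else pvFindMatch entry leave rest (k + 1)

def get_blossom_path_alt (blossom : List Int) (entry : Int) (leave : Int) : List Int :=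
  match pvFindMatch entry leave blossom 0 with
  | none => []
  | some i =>
    match pvFindMatch entry leave (blossom.drop (i + 1)) (i + 1) with
    | none =>
      let fore := blossom.drop i
      if fore.length % 2 == 0 then fore else (blossom.take (i + 1)).reverse
    | some j =>
      let fore := (blossom.take (j + 1)).drop i
      if fore.length % 2 == 0 then fore
      else (blossom.take (i + 1)).reverse ++ (blossom.drop j).reverse

-- ===== PRECONDITION & SPEC =====
def Spec_get_blossom_path (blossom : List Int) (entry : Int) (leave : Int) (out : List Int) : Prop := out = get_blossom_path_alt blossom entry leave
instance (blossom : List Int) (entry : Int) (leave : Int) (out : List Int) : Decidable (Spec_get_blossom_path blossom entry leave out) := by unfold Spec_get_blossom_path; infer_instance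

-- ===== CLAIM (what is proved, stated in full; the proofs are below) =====
def Claim_equal_get_blossom_path : Prop := ∀ (blossom : List Int) (entry : Int) (leave : Int), Dom_get_blossom_path blossom entry leave → Spec_get_blossom_path blossom entry leave (get_blossom_path blossom entry leave)


-- ===== LEMMAS AND PROOFS =====

theorem foldA_stage3 (e l : Int) (xs b f bt : List Int) :
    xs.foldl (pvStepA e l) (b, f, bt, 3) = (b, f, bt ++ xs, 3) := by
  induction xs generalizing bt with
  | nil => simp
  | cons v r ih => simp [pvStepA, ih]

theorem foldA_stage2_none (e l : Int) (xs : List Int)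
    (h : ∀ v ∈ xs, (v == e || v == l) = false) (b f bt : List Int) :
    xs.foldl (pvStepA e l) (b, f, bt, 2) = (b, f ++ xs, bt, 2) := by
  induction xs generalizing f with
  | nil => simp
  | cons v r ih =>
    have hv := h v (by simp)
    have hr : ∀ w ∈ r, (w == e || w == l) = false := fun w hw => h w (by simp [hw])
    simp only [List.foldl_cons, pvStepA, hv]
    simp only [Nat.reduceBEq, Bool.false_eq_true, if_false, if_true, beq_self_eq_true]
    rw [ih hr]
    simp

theorem foldA_stage2_split (e l : Int) (m t b f bt : List Int) (y : Int)
    (hm : ∀ v ∈ m, (v == e || v == l) = false) (hy : (y == e || y == l) = true) :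
    (m ++ y :: t).foldl (pvStepA e l) (b, f, bt, 2) = (b, f ++ m ++ [y], bt ++ y :: t, 3) := by
  rw [List.foldl_append, foldA_stage2_none e l m hm b f bt]
  simp only [List.foldl_cons, pvStepA, hy]
  simp [foldA_stage3]

theorem foldA_stage1_none (e l : Int) (xs : List Int)
    (h : ∀ v ∈ xs, (v == e || v == l) = false) (b f bt : List Int) :
    xs.foldl (pvStepA e l) (b, f, bt, 1) = (b ++ xs, f, bt, 1) := by
  induction xs generalizing b with
  | nil => simp
  | cons v r ih =>
    have hv := h v (by simp)
    have hr : ∀ w ∈ r, (w == e || w == l) = false := fun w hw => h w (by simp [hw])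
    simp only [List.foldl_cons, pvStepA, hv]
    simp only [Bool.false_eq_true, if_false, if_true, beq_self_eq_true]
    rw [ih hr]
    simp

theorem foldA_stage1_split (e l : Int) (u r b f bt : List Int) (x : Int)
    (hu : ∀ v ∈ u, (v == e || v == l) = false) (hx : (x == e || x == l) = true) :
    (u ++ x :: r).foldl (pvStepA e l) (b, f, bt, 1) =
      r.foldl (pvStepA e l) (b ++ u ++ [x], f ++ [x], bt, 2) := by
  rw [List.foldl_append, foldA_stage1_none e l u hu b f bt]
  simp [pvStepA, hx]

theorem findMatch_none (e l : Int) (xs : List Int)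
    (h : ∀ v ∈ xs, (v == e || v == l) = false) (k : Nat) :
    pvFindMatch e l xs k = none := by
  induction xs generalizing k with
  | nil => rfl
  | cons v r ih =>
    have hv := h v (by simp)
    simp [pvFindMatch, hv, ih (fun w hw => h w (by simp [hw]))]

theorem findMatch_split (e l : Int) (u : List Int) (x : Int) (r : List Int)
    (hu : ∀ v ∈ u, (v == e || v == l) = false) (hx : (x == e || x == l) = true) (k : Nat) :
    pvFindMatch e l (u ++ x :: r) k = some (k + u.length) := by
  induction u generalizing k with
  | nil => simp [pvFindMatch, hx]
  | cons v w ih =>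
    have hv := hu v (by simp)
    have hrec := ih (fun z hz => hu z (by simp [hz])) (k + 1)
    simp only [List.cons_append, pvFindMatch, hv, Bool.false_eq_true, if_false, hrec]
    congr 1
    simp only [List.length_cons]
    omega

theorem findMatch_split0 (e l : Int) (u : List Int) (x : Int) (r : List Int)
    (hu : ∀ v ∈ u, (v == e || v == l) = false) (hx : (x == e || x == l) = true) :
    pvFindMatch e l (u ++ x :: r) 0 = some u.length := by
  simpa using findMatch_split e l u x r hu hx 0

theorem dropH (u z : List Int) (k : Nat) : (u ++ z).drop (u.length + k) = z.drop k := by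
  rw [List.drop_append]
  simp

theorem takeH (u z : List Int) (k : Nat) : (u ++ z).take (u.length + k) = u ++ z.take k := by
  rw [List.take_append]
  simp

theorem dropWhile_cons_head_false (p : Int → Bool) (xs : List Int) (x : Int) (r : List Int)
    (h : xs.dropWhile p = x :: r) : p x = false := by
  induction xs with
  | nil => simp at h
  | cons a as ih =>
    rw [List.dropWhile_cons] at h
    split at h
    · exact ih h
    · cases h
      simpa using ‹¬ p x = true›

-- Case: no vertex of the blossom matches entry/leave.
theorem case_none (e l : Int) (bl : List Int)
    (h : ∀ v ∈ bl, (v == e || v == l) = false) :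
    get_blossom_path bl e l = get_blossom_path_alt bl e l := by
  rw [get_blossom_path, get_blossom_path_alt,
    foldA_stage1_none e l bl h [] [] [], findMatch_none e l bl h 0]
  simp

-- Case: exactly one matching vertex x; bl = u ++ x :: r' with no match in u or r'.
theorem case_one (e l : Int) (u : List Int) (x : Int) (r' : List Int)
    (hu : ∀ v ∈ u, (v == e || v == l) = false) (hx : (x == e || x == l) = true)
    (hr' : ∀ v ∈ r', (v == e || v == l) = false) :
    get_blossom_path (u ++ x :: r') e l = get_blossom_path_alt (u ++ x :: r') e l := by
  have hdrop1 : (u ++ x :: r').drop (u.length + 1) = r' := by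
    rw [dropH]; simp
  have htake1 : (u ++ x :: r').take (u.length + 1) = u ++ [x] := by
    rw [takeH]; simp
  have hdrop0 : (u ++ x :: r').drop u.length = x :: r' := by
    simpa using dropH u (x :: r') 0
  rw [get_blossom_path, get_blossom_path_alt,
    foldA_stage1_split e l u r' [] [] [] x hu hx,
    foldA_stage2_none e l r' hr' ([] ++ u ++ [x]) ([] ++ [x]) [],
    findMatch_split0 e l u x r' hu hx]
  simp only [hdrop1, findMatch_none e l r' hr' (u.length + 1), hdrop0, htake1]
  simp

-- Case: at least two matching vertices; bl = u ++ x :: (m ++ y :: t), no match in u or m.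
theorem case_two (e l : Int) (u : List Int) (x : Int) (m : List Int) (y : Int) (t : List Int)
    (hu : ∀ v ∈ u, (v == e || v == l) = false) (hx : (x == e || x == l) = true)
    (hm : ∀ v ∈ m, (v == e || v == l) = false) (hy : (y == e || y == l) = true) :
    get_blossom_path (u ++ x :: (m ++ y :: t)) e l =
      get_blossom_path_alt (u ++ x :: (m ++ y :: t)) e l := by
  have hdrop1 : (u ++ x :: (m ++ y :: t)).drop (u.length + 1) = m ++ y :: t := by
    rw [dropH]; simp
  have htake1 : (u ++ x :: (m ++ y :: t)).take (u.length + 1) = u ++ [x] := by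
    rw [takeH]; simp
  have htakej : (u ++ x :: (m ++ y :: t)).take (u.length + 1 + m.length + 1) =
      u ++ (x :: m ++ [y]) := by
    rw [show u.length + 1 + m.length + 1 = u.length + (m.length + 1 + 1) by omega, takeH]
    simp only [List.take_succ_cons]
    rw [show (m ++ y :: t).take (m.length + 1) = m ++ (y :: t).take 1 from takeH m (y :: t) 1]
    simp
  have hdropj : (u ++ x :: (m ++ y :: t)).drop (u.length + 1 + m.length) = y :: t := by
    rw [show u.length + 1 + m.length = u.length + (m.length + 1) by omega, dropH]
    simp only [List.drop_succ_cons]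
    simpa using dropH m (y :: t) 0
  have hfore : ((u ++ x :: (m ++ y :: t)).take (u.length + 1 + m.length + 1)).drop u.length =
      x :: m ++ [y] := by
    rw [htakej]
    simpa using dropH u (x :: m ++ [y]) 0
  rw [get_blossom_path, get_blossom_path_alt,
    foldA_stage1_split e l u (m ++ y :: t) [] [] [] x hu hx,
    foldA_stage2_split e l m t ([] ++ u ++ [x]) ([] ++ [x]) [] y hm hy,
    findMatch_split0 e l u x (m ++ y :: t) hu hx]
  simp only [hdrop1, findMatch_split e l m y t hm hy (u.length + 1), hfore, htake1, hdropj]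
  simp

theorem get_blossom_path_eq_alt (blossom : List Int) (e l : Int) :
    get_blossom_path blossom e l = get_blossom_path_alt blossom e l := by
  rcases hR : blossom.dropWhile (fun w => !(w == e || w == l)) with - | ⟨x, r'⟩
  · have h : ∀ v ∈ blossom, (v == e || v == l) = false := by
      intro v hv
      have := List.dropWhile_eq_nil_iff.mp hR v hv
      simpa using this
    exact case_none e l blossom h
  · have hb : blossom = blossom.takeWhile (fun w => !(w == e || w == l)) ++ x :: r' := by
      conv_lhs => rw [← List.takeWhile_append_dropWhile
        (p := fun w => !(w == e || w == l)) (l := blossom)]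
      rw [hR]
    have hu : ∀ v ∈ blossom.takeWhile (fun w => !(w == e || w == l)),
        (v == e || v == l) = false := by
      intro v hv
      have := List.mem_takeWhile_imp hv
      simpa using this
    have hx : (x == e || x == l) = true := by
      have h0 := dropWhile_cons_head_false (fun w => !(w == e || w == l)) blossom x r' hR
      cases hc : (x == e || x == l)
      · exfalso; simp only [hc] at h0; simp at h0
      · rfl
    rcases hR2 : r'.dropWhile (fun w => !(w == e || w == l)) with - | ⟨y, t⟩
    · have hr' : ∀ v ∈ r', (v == e || v == l) = false := by
        intro v hv
        have := List.dropWhile_eq_nil_iff.mp hR2 v hv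
        simpa using this
      rw [hb]
      exact case_one e l _ x r' hu hx hr'
    · have hr'b : r' = r'.takeWhile (fun w => !(w == e || w == l)) ++ y :: t := by
        conv_lhs => rw [← List.takeWhile_append_dropWhile
          (p := fun w => !(w == e || w == l)) (l := r')]
        rw [hR2]
      have hm : ∀ v ∈ r'.takeWhile (fun w => !(w == e || w == l)),
          (v == e || v == l) = false := by
        intro v hv
        have := List.mem_takeWhile_imp hv
        simpa using this
      have hy : (y == e || y == l) = true := by
        have h0 := dropWhile_cons_head_false (fun w => !(w == e || w == l)) r' y t hR2
        cases hc : (y == e || y == l)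
        · exfalso; simp only [hc] at h0; simp at h0
        · rfl
      rw [hb, hr'b]
      exact case_two e l _ x _ y t hu hx hm hy

-- ===== VERDICT (by name: the statement is the Claim_ definition above) =====
theorem get_blossom_path_spec : Claim_equal_get_blossom_path := by
  intro blossom e l _
  unfold Spec_get_blossom_path
  exact get_blossom_path_eq_alt blossom e l
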